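-- pv_equiv track=rewrite | github.com/scawful/afs | src/afs/session_harness.py | _normalize_verification_status
-- ===== SOURCE A (Python) =====
-- from typing import Any
--
-- def _normalize_verification_status(value: Any) -> str:
--     text = str(value or "").strip().lower()
--     if text in {"passed", "pass", "verified", "ok", "success"}:
--         return "passed"
--     if text in {"failed", "fail", "error"}:
--         return "failed"
--     if text in {"skipped", "skip"}:
--         return "skipped"
--     if text in {"missing", "pending", "not_required"}:
--         return text
--     if text.startswith("verification_"):
--         return _normalize_verification_status(text.removeprefix("verification_"))
--     return ""
-- ===== SOURCE B (Python) =====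
-- _STATUS_ALIASES = {
--     "passed": "passed", "pass": "passed", "verified": "passed", "ok": "passed",
--     "success": "passed", "failed": "failed", "fail": "failed", "error": "failed",
--     "skipped": "skipped", "skip": "skipped",
--     "missing": "missing", "pending": "pending", "not_required": "not_required",
-- }
--
-- def _normalize_verification_status(value):
--     text = str(value or "").strip().lower()
--     while text.startswith("verification_"):
--         text = text.removeprefix("verification_").strip().lower()
--     return _STATUS_ALIASES.get(text, "")
-- ===== Notes on version B (the rewrite author's own statement) =====
-- stated objective: simpler
-- what changed: A's four membership-set branch blocks plus tail recursion are replaced by a while loop that strips the verification prefix up front and a single alias-dictionary lookup with a default.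
import Mathlib
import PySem

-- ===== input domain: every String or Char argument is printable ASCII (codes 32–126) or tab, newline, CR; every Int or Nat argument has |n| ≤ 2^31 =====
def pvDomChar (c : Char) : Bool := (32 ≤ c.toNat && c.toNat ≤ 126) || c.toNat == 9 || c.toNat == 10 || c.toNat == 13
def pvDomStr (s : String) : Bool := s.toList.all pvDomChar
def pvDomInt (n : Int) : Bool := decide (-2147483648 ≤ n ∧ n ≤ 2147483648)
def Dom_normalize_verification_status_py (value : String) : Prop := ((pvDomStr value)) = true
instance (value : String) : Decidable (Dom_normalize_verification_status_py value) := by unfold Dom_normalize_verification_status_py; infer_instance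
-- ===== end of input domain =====

-- B is simpler: A's four membership branches plus tail recursion become one prefix-stripping
-- loop followed by a single alias-table lookup (same return value; no side effects involved).

-- ===== PORT A =====
-- "verification_" (13 chars), the prefix A peels recursively
def pvPfx : List Char := "verification_".toList

-- drop-13 shrinks the string when the prefix is present (used for A's termination)
theorem pvStartswith_len {t : List Char} (h : PySem.Chars.startswith t pvPfx = true) :
    pvPfx.length ≤ t.length := by
  have := (PySem.Chars.startswith_iff t pvPfx).mp h
  exact this.length_le

theorem pvTextLen (v : List Char) :
    (PySem.Chars.lower (PySem.Chars.strip v)).length ≤ v.length := by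
  simp [PySem.Chars.lower, PySem.Chars.strip, PySem.Chars.lstrip, PySem.Chars.rstrip]
  calc (List.dropWhile PySem.Chars.isspace (List.dropWhile PySem.Chars.isspace v).reverse).length
      ≤ (List.dropWhile PySem.Chars.isspace v).reverse.length := List.length_dropWhile_le _ _
    _ ≤ v.length := by simpa using List.length_dropWhile_le PySem.Chars.isspace v

-- A's body, step for step, on the char list of the argument (`str(value or "")` is `value`
-- itself for a str argument, since str("") = ""); the recursive call re-enters the whole
-- function on text.removeprefix("verification_"), exactly as A does.
def pvAgo (v : List Char) : String :=
  let text := PySem.Chars.lower (PySem.Chars.strip v)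
  if text = "passed".toList ∨ text = "pass".toList ∨ text = "verified".toList ∨
     text = "ok".toList ∨ text = "success".toList then "passed"
  else if text = "failed".toList ∨ text = "fail".toList ∨ text = "error".toList then "failed"
  else if text = "skipped".toList ∨ text = "skip".toList then "skipped"
  else if text = "missing".toList ∨ text = "pending".toList ∨ text = "not_required".toList then
    String.ofList text
  else if hs : PySem.Chars.startswith text pvPfx then
    pvAgo (text.drop pvPfx.length)
  else ""
termination_by v.length
decreasing_by
  have h1 := pvTextLen v
  have h2 := pvStartswith_len hs
  have ht : text = PySem.Chars.lower (PySem.Chars.strip v) := rfl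
  rw [ht] at h2
  simp only [List.length_drop]
  simp [pvPfx] at h2 ⊢
  omega

def normalize_verification_status_py (value : String) : String := pvAgo value.toList

-- ===== PORT B =====
-- the alias table of Source B, in its insertion order
def pvAliases : PySem.Dict (List Char) String := PySem.Dict.ofList
  [("passed".toList, "passed"), ("pass".toList, "passed"), ("verified".toList, "passed"),
   ("ok".toList, "passed"), ("success".toList, "passed"),
   ("failed".toList, "failed"), ("fail".toList, "failed"), ("error".toList, "failed"),
   ("skipped".toList, "skipped"), ("skip".toList, "skipped"),
   ("missing".toList, "missing"), ("pending".toList, "pending"),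
   ("not_required".toList, "not_required")]

-- Source B's while loop: strip the prefix (re-normalizing) until it is gone
def pvStripLoop (t : List Char) : List Char :=
  if hs : PySem.Chars.startswith t pvPfx then
    pvStripLoop (PySem.Chars.lower (PySem.Chars.strip (t.drop pvPfx.length)))
  else t
termination_by t.length
decreasing_by
  have h1 := pvTextLen (t.drop pvPfx.length)
  have h2 := pvStartswith_len hs
  simp only [List.length_drop] at h1
  simp [pvPfx] at h2 h1 ⊢
  omega

def pvBcore (v : List Char) : String :=
  PySem.Dict.getD pvAliases (pvStripLoop (PySem.Chars.lower (PySem.Chars.strip v))) ""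

def normalize_verification_status_py_alt (value : String) : String := pvBcore value.toList

-- ===== PRECONDITION & SPEC =====
def Spec_normalize_verification_status_py (value : String) (out : String) : Prop := out = normalize_verification_status_py_alt value
instance (value : String) (out : String) : Decidable (Spec_normalize_verification_status_py value out) := by unfold Spec_normalize_verification_status_py; infer_instance

-- ===== CLAIM (what is proved, stated in full; the proofs are below) =====
def Claim_equal_normalize_verification_status_py : Prop := ∀ (value : String), Dom_normalize_verification_status_py value → Spec_normalize_verification_status_py value (normalize_verification_status_py value)

-- ===== LEMMAS AND PROOFS =====

-- A's branch chain (with the startswith case already resolved to "") IS the table lookup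
theorem pvLookup (t : List Char) :
    (if t = "passed".toList ∨ t = "pass".toList ∨ t = "verified".toList ∨
        t = "ok".toList ∨ t = "success".toList then "passed"
     else if t = "failed".toList ∨ t = "fail".toList ∨ t = "error".toList then "failed"
     else if t = "skipped".toList ∨ t = "skip".toList then "skipped"
     else if t = "missing".toList ∨ t = "pending".toList ∨ t = "not_required".toList then
       String.ofList t
     else "") = PySem.Dict.getD pvAliases t "" := by
  by_cases h1 : t = "passed".toList; · subst h1; decide
  by_cases h2 : t = "pass".toList; · subst h2; decide
  by_cases h3 : t = "verified".toList; · subst h3; decide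
  by_cases h4 : t = "ok".toList; · subst h4; decide
  by_cases h5 : t = "success".toList; · subst h5; decide
  by_cases h6 : t = "failed".toList; · subst h6; decide
  by_cases h7 : t = "fail".toList; · subst h7; decide
  by_cases h8 : t = "error".toList; · subst h8; decide
  by_cases h9 : t = "skipped".toList; · subst h9; decide
  by_cases h10 : t = "skip".toList; · subst h10; decide
  by_cases h11 : t = "missing".toList; · subst h11; decide
  by_cases h12 : t = "pending".toList; · subst h12; decide
  by_cases h13 : t = "not_required".toList; · subst h13; decide
  have hit : pvAliases.items =
      [("passed".toList, "passed"), ("pass".toList, "passed"), ("verified".toList, "passed"),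
       ("ok".toList, "passed"), ("success".toList, "passed"),
       ("failed".toList, "failed"), ("fail".toList, "failed"), ("error".toList, "failed"),
       ("skipped".toList, "skipped"), ("skip".toList, "skipped"),
       ("missing".toList, "missing"), ("pending".toList, "pending"),
       ("not_required".toList, "not_required")] := by decide
  have b1 : ("passed".toList == t) = false := by simpa using Ne.symm h1
  have b2 : ("pass".toList == t) = false := by simpa using Ne.symm h2
  have b3 : ("verified".toList == t) = false := by simpa using Ne.symm h3
  have b4 : ("ok".toList == t) = false := by simpa using Ne.symm h4
  have b5 : ("success".toList == t) = false := by simpa using Ne.symm h5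
  have b6 : ("failed".toList == t) = false := by simpa using Ne.symm h6
  have b7 : ("fail".toList == t) = false := by simpa using Ne.symm h7
  have b8 : ("error".toList == t) = false := by simpa using Ne.symm h8
  have b9 : ("skipped".toList == t) = false := by simpa using Ne.symm h9
  have b10 : ("skip".toList == t) = false := by simpa using Ne.symm h10
  have b11 : ("missing".toList == t) = false := by simpa using Ne.symm h11
  have b12 : ("pending".toList == t) = false := by simpa using Ne.symm h12
  have b13 : ("not_required".toList == t) = false := by simpa using Ne.symm h13
  simp only [PySem.Dict.getD, PySem.Dict.get?, hit, List.find?,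
        b1, b2, b3, b4, b5, b6, b7, b8, b9, b10, b11, b12, b13,
        h1, h2, h3, h4, h5, h6, h7, h8, h9, h10, h11, h12, h13,
        false_or, or_self, if_false, Option.map_none, Option.getD_none]

-- a string starting with "verification_" equals none of the alias keys
theorem pvKeyNoPfx {t k : List Char} (hs : PySem.Chars.startswith t pvPfx = true)
    (hk : PySem.Chars.startswith k pvPfx = false) : t ≠ k := by
  intro h; subst h; rw [hs] at hk; simp at hk

theorem pvCoreEq (n : Nat) (v : List Char) (hv : v.length ≤ n) : pvAgo v = pvBcore v := by
  induction n generalizing v with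
  | zero =>
    have hz : v = [] := List.eq_nil_of_length_eq_zero (Nat.le_zero.mp hv)
    subst hz
    rw [pvAgo, pvBcore, pvStripLoop]
    decide
  | succ n ih =>
    by_cases hs : PySem.Chars.startswith (PySem.Chars.lower (PySem.Chars.strip v)) pvPfx = true
    · -- both sides peel one prefix, then the IH applies
      have hL := pvTextLen v
      have hP := pvStartswith_len hs
      rw [pvAgo, pvBcore, pvStripLoop]
      simp only [hs, dif_pos,
        pvKeyNoPfx hs (by decide : PySem.Chars.startswith "passed".toList pvPfx = false),
        pvKeyNoPfx hs (by decide : PySem.Chars.startswith "pass".toList pvPfx = false),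
        pvKeyNoPfx hs (by decide : PySem.Chars.startswith "verified".toList pvPfx = false),
        pvKeyNoPfx hs (by decide : PySem.Chars.startswith "ok".toList pvPfx = false),
        pvKeyNoPfx hs (by decide : PySem.Chars.startswith "success".toList pvPfx = false),
        pvKeyNoPfx hs (by decide : PySem.Chars.startswith "failed".toList pvPfx = false),
        pvKeyNoPfx hs (by decide : PySem.Chars.startswith "fail".toList pvPfx = false),
        pvKeyNoPfx hs (by decide : PySem.Chars.startswith "error".toList pvPfx = false),
        pvKeyNoPfx hs (by decide : PySem.Chars.startswith "skipped".toList pvPfx = false),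
        pvKeyNoPfx hs (by decide : PySem.Chars.startswith "skip".toList pvPfx = false),
        pvKeyNoPfx hs (by decide : PySem.Chars.startswith "missing".toList pvPfx = false),
        pvKeyNoPfx hs (by decide : PySem.Chars.startswith "pending".toList pvPfx = false),
        pvKeyNoPfx hs (by decide : PySem.Chars.startswith "not_required".toList pvPfx = false),
        or_self, if_false]
      have hrec := ih ((PySem.Chars.lower (PySem.Chars.strip v)).drop pvPfx.length)
        (by simp only [List.length_drop]; simp [pvPfx] at hP ⊢; omega)
      rw [hrec, pvBcore]
    · simp only [Bool.not_eq_true] at hs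
      rw [pvAgo, pvBcore, pvStripLoop]
      simp only [hs, Bool.false_eq_true, dite_false]
      exact pvLookup _

-- ===== VERDICT (by name: the statement is the Claim_ definition above) =====
theorem normalize_verification_status_py_spec : Claim_equal_normalize_verification_status_py := by
  intro value _
  unfold Spec_normalize_verification_status_py normalize_verification_status_py normalize_verification_status_py_alt
  exact pvCoreEq value.toList.length value.toList le_rfl
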